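-- pv_equiv track=rewrite | github.com/camel-ai/gecko | utils/test_selector.py | create_test_batches
-- ===== SOURCE A (Python) =====
-- from typing import Any, Callable, Dict, List, Optional, Set, Union
--
-- def create_test_batches(
--                       test_ids: List[str],
--                       batch_size: int,
--                       strategy: str = "sequential") -> List[List[str]]:
--     if batch_size <= 0:
--         raise ValueError("Batch size must be positive")
--
--     if strategy == "sequential":
--         batches = []
--         for i in range(0, len(test_ids), batch_size):
--             batches.append(test_ids[i:i + batch_size])
--         return batches
--
--     elif strategy == "round_robin":
--         num_batches = (len(test_ids) + batch_size - 1) // batch_size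
--         batches = [[] for _ in range(num_batches)]
--
--         for i, test_id in enumerate(test_ids):
--             batch_idx = i % num_batches
--             batches[batch_idx].append(test_id)
--
--         return [batch for batch in batches if batch]
--
--     elif strategy == "balanced":
--         num_batches = (len(test_ids) + batch_size - 1) // batch_size
--         batches = [[] for _ in range(num_batches)]
--
--         for i, test_id in enumerate(test_ids):
--             batch_idx = i % num_batches
--             batches[batch_idx].append(test_id)
--
--         return [batch for batch in batches if batch]
--
--     else:
--         raise ValueError(f"Unknown batching strategy: {strategy}")
-- ===== SOURCE B (Python) =====
-- from typing import List
--
-- def create_test_batches(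
--                       test_ids: List[str],
--                       batch_size: int,
--                       strategy: str = "sequential") -> List[List[str]]:
--     if batch_size <= 0:
--         raise ValueError("Batch size must be positive")
--
--     if strategy == "sequential":
--         return [test_ids[i:i + batch_size]
--                 for i in range(0, len(test_ids), batch_size)]
--
--     if strategy in ("round_robin", "balanced"):
--         num_batches = (len(test_ids) + batch_size - 1) // batch_size
--         # batch j holds the elements at indices j, j+num_batches, ... ;
--         # num_batches <= len(test_ids), so no batch is ever empty.
--         return [test_ids[j::num_batches] for j in range(num_batches)]
--
--     raise ValueError(f"Unknown batching strategy: {strategy}")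
-- ===== Notes on version B (the rewrite author's own statement) =====
-- stated objective: idiomatic
-- what changed: The round_robin/balanced buckets are no longer built by an index-modulo dispatch loop into mutable lists followed by an empty-bucket filter; B emits each batch directly as a stride slice test_ids[j::num_batches] (one comprehension, no filter, needed since num_batches <= len(test_ids) makes every bucket nonempty), and the two duplicated strategy branches are merged.
import Mathlib
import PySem

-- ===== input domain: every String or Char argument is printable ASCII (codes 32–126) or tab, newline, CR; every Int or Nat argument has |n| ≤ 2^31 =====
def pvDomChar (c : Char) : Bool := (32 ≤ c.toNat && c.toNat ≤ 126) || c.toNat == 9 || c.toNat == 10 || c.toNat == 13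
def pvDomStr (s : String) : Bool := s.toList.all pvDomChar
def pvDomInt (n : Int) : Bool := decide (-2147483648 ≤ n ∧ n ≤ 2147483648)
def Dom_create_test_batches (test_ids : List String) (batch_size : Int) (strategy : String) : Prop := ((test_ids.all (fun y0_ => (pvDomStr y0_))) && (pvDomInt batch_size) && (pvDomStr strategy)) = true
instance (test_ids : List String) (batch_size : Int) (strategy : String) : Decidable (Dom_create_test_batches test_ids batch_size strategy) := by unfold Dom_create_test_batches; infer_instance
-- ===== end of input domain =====

-- B rewrites the round_robin/balanced branches: instead of a modulo-dispatch loop into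
-- mutable buckets followed by an empty-bucket filter, it emits each batch directly as the
-- stride slice test_ids[j::num_batches]; same return value, same cost (objective: idiomatic).


-- ===== PORT A =====
-- Literal port of A.  Where the Python raises ValueError (batch_size <= 0, unknown
-- strategy) the port returns [] and Pre_ excludes those inputs.
def create_test_batches (test_ids : List String) (batch_size : Int) (strategy : String) : List (List String) :=
  if batch_size ≤ 0 then []  -- raise ValueError: excluded by Pre_
  else if strategy = "sequential" then
    (PySem.List.pyRange 0 (test_ids.length : Int) batch_size).foldl
      (fun batches i => batches ++ [PySem.List.slice test_ids (some i) (some (i + batch_size))]) []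
  else if strategy = "round_robin" then
    let num_batches := PySem.Int.floordiv ((test_ids.length : Int) + batch_size - 1) batch_size
    let init := (PySem.List.pyRange 0 num_batches 1).map (fun _ => ([] : List String))
    let batches := (PySem.List.enumerate test_ids 0).foldl
      (fun b p =>
        let batch_idx := PySem.Int.mod p.1 num_batches
        PySem.List.pySetD b batch_idx (PySem.List.pyGetD b batch_idx [] ++ [p.2])) init
    batches.filter (fun batch => !batch.isEmpty)
  else if strategy = "balanced" then
    let num_batches := PySem.Int.floordiv ((test_ids.length : Int) + batch_size - 1) batch_size
    let init := (PySem.List.pyRange 0 num_batches 1).map (fun _ => ([] : List String))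
    let batches := (PySem.List.enumerate test_ids 0).foldl
      (fun b p =>
        let batch_idx := PySem.Int.mod p.1 num_batches
        PySem.List.pySetD b batch_idx (PySem.List.pyGetD b batch_idx [] ++ [p.2])) init
    batches.filter (fun batch => !batch.isEmpty)
  else []  -- raise ValueError: excluded by Pre_

-- ===== PORT B =====
-- Literal port of Source B.  test_ids[j::num_batches] is PySem.List.slice?; for every j the
-- range produces, num_batches ≥ 1, so slice? is some and the .getD [] default never fires.
def create_test_batches_alt (test_ids : List String) (batch_size : Int) (strategy : String) : List (List String) :=
  if batch_size ≤ 0 then []  -- raise ValueError: excluded by Pre_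
  else if strategy = "sequential" then
    (PySem.List.pyRange 0 (test_ids.length : Int) batch_size).map
      (fun i => PySem.List.slice test_ids (some i) (some (i + batch_size)))
  else if strategy = "round_robin" ∨ strategy = "balanced" then
    let num_batches := PySem.Int.floordiv ((test_ids.length : Int) + batch_size - 1) batch_size
    (PySem.List.pyRange 0 num_batches 1).map
      (fun j => (PySem.List.slice? test_ids (some j) none num_batches).getD [])
  else []  -- raise ValueError: excluded by Pre_

-- ===== PRECONDITION & SPEC =====
-- Pre_ excludes exactly the inputs where A raises ValueError: a non-positive batch_size or
-- an unknown strategy string.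
def Pre_create_test_batches (test_ids : List String) (batch_size : Int) (strategy : String) : Prop :=
  0 < batch_size ∧ (strategy = "sequential" ∨ strategy = "round_robin" ∨ strategy = "balanced")
instance (test_ids : List String) (batch_size : Int) (strategy : String) : Decidable (Pre_create_test_batches test_ids batch_size strategy) := by unfold Pre_create_test_batches; infer_instance

def pvWitness_create_test_batches : List String × Int × String := (["a", "b", "c", "d", "e"], 2, "round_robin")

def Spec_create_test_batches (test_ids : List String) (batch_size : Int) (strategy : String) (out : List (List String)) : Prop := out = create_test_batches_alt test_ids batch_size strategy
instance (test_ids : List String) (batch_size : Int) (strategy : String) (out : List (List String)) : Decidable (Spec_create_test_batches test_ids batch_size strategy out) := by unfold Spec_create_test_batches; infer_instance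

-- ===== CLAIM (what is proved, stated in full; the proofs are below) =====
def Claim_equal_create_test_batches : Prop := ∀ (test_ids : List String) (batch_size : Int) (strategy : String), Dom_create_test_batches test_ids batch_size strategy → Pre_create_test_batches test_ids batch_size strategy → Spec_create_test_batches test_ids batch_size strategy (create_test_batches test_ids batch_size strategy)

-- ===== LEMMAS AND PROOFS =====

lemma pv_getD_set {α : Type} (l : List α) (i j : Nat) (v d : α) (hi : i < l.length) :
    (l.set i v).getD j d = if j = i then v else l.getD j d := by
  rcases Nat.lt_or_ge j l.length with hj | hj
  · by_cases hji : j = i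
    · subst hji; simp [List.getD_eq_getElem?_getD, hj]
    · rw [List.getD_eq_getElem?_getD, List.getD_eq_getElem?_getD,
        List.getElem?_set_ne (fun h => hji h.symm), if_neg hji]
  · have h1 : l[j]? = none := List.getElem?_eq_none hj
    have h2 : (l.set i v)[j]? = none := List.getElem?_eq_none (by simpa using hj)
    have hji : j ≠ i := by omega
    simp [List.getD_eq_getElem?_getD, h1, h2, hji]

lemma pv_map_range_getD {α : Type} {m : Nat} (acc : List α) (d : α) (h : acc.length = m) :
    (List.range m).map (fun j => acc.getD j d) = acc := by
  apply List.ext_getElem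
  · simp [h]
  · intro i h1 h2
    rw [List.getElem_map, List.getElem_range, List.getD_eq_getElem?_getD,
      List.getElem?_eq_getElem h2]
    rfl

def pvF {α : Type} : List α → Nat → Nat → Nat → List α
  | [], _, _, _ => []
  | x :: t, s, m, j => if s % m = j then x :: pvF t (s+1) m j else pvF t (s+1) m j

lemma pv_pvF_eq {α : Type} (m j : Nat) (xs : List α) : ∀ s : Nat,
    pvF xs s m j = (List.range xs.length).filterMap (fun k => if (s + k) % m = j then xs[k]? else none) := by
  induction xs with
  | nil => intro s; simp [pvF]
  | cons x t ih =>
    intro s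
    rw [List.length_cons, List.range_succ_eq_map]
    simp only [List.filterMap_cons, List.filterMap_map]
    have ht : (List.filterMap ((fun k => if (s + k) % m = j then (x :: t)[k]? else none) ∘ Nat.succ) (List.range t.length))
        = List.filterMap (fun k => if (s + 1 + k) % m = j then t[k]? else none) (List.range t.length) := by
      apply List.filterMap_congr
      intro k _
      simp only [Function.comp]
      have : s + (k + 1) = s + 1 + k := by omega
      simp [Nat.succ_eq_add_one, this]
    rw [ht, ← ih (s+1)]
    by_cases hs : s % m = j <;> simp [pvF, hs]

def pvG {α : Type} (xs : List α) (m j : Nat) : List α :=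
  (List.range xs.length).filterMap (fun k => if k % m = j then xs[k]? else none)

lemma pv_G_ne_nil {α : Type} (xs : List α) (m j : Nat) (hj : j < m) (hjn : j < xs.length) :
    pvG xs m j ≠ [] := by
  have : xs[j] ∈ pvG xs m j := by
    unfold pvG
    apply List.mem_filterMap.mpr
    exact ⟨j, by simp [List.mem_range, hjn, Nat.mod_eq_of_lt hj]⟩
  exact fun h => by simp [h] at this

lemma pv_foldA {α : Type} (m : Nat) (hm : 0 < m) (xs : List α) : ∀ (s : Nat) (acc : List (List α)), acc.length = m →
    (PySem.List.enumerate xs (s : Int)).foldl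
      (fun b p =>
        let batch_idx := PySem.Int.mod p.1 (m : Int)
        PySem.List.pySetD b batch_idx (PySem.List.pyGetD b batch_idx [] ++ [p.2])) acc
    = (List.range m).map (fun j => acc.getD j [] ++ pvF xs s m j) := by
  induction xs with
  | nil =>
    intro s acc hlen
    simp only [PySem.List.enumerate_nil, List.foldl_nil, pvF, List.append_nil]
    exact (pv_map_range_getD acc [] hlen).symm
  | cons x t ih =>
    intro s acc hlen
    rw [PySem.List.enumerate_cons, List.foldl_cons]
    have hcast : (s : Int) + 1 = ((s + 1 : Nat) : Int) := by push_cast; ring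
    rw [hcast]
    have hmod : PySem.Int.mod ((s : Nat) : Int) ((m : Nat) : Int) = ((s % m : Nat) : Int) :=
      PySem.Int.mod_natCast s m
    simp only [hmod, PySem.List.pySetD_natCast, PySem.List.pyGetD_natCast]
    rw [ih (s + 1) _ (by simpa using hlen)]
    apply List.map_congr_left
    intro j hj
    rw [List.mem_range] at hj
    have hsm : s % m < m := Nat.mod_lt _ hm
    rw [pv_getD_set _ _ _ _ _ (by omega)]
    by_cases hje : j = s % m
    · subst hje
      simp [pvF]
    · have hne : ¬ s % m = j := by omega
      simp [pvF, if_neg hje, if_neg hne]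

lemma pv_idx_eq (n m j : Nat) (hm : 0 < m) (hj : j < m) (hjn : j < n) :
    (List.range ((n - j + m - 1) / m)).map (fun k => j + m * k) = (List.range n).filter (fun k => k % m = j) := by
  have nd1 : (List.map (fun k => j + m * k) (List.range ((n - j + m - 1) / m))).Nodup :=
    List.Nodup.map (fun a b h => Nat.eq_of_mul_eq_mul_left hm (by omega)) List.nodup_range
  have nd2 : ((List.range n).filter (fun k => k % m = j)).Nodup := List.Nodup.filter _ List.nodup_range
  have hmem : ∀ k, k ∈ List.map (fun k => j + m * k) (List.range ((n - j + m - 1) / m)) ↔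
      k ∈ (List.range n).filter (fun k => k % m = j) := by
    intro k
    simp only [List.mem_map, List.mem_range, List.mem_filter, decide_eq_true_eq]
    constructor
    · rintro ⟨t, ht, rfl⟩
      have h1 : (t + 1) * m ≤ n - j + m - 1 := (Nat.le_div_iff_mul_le hm).mp ht
      constructor
      · have : (t+1)*m = m*t+m := by ring
        omega
      · rw [Nat.add_mul_mod_self_left, Nat.mod_eq_of_lt hj]
    · rintro ⟨hk, hkm⟩
      refine ⟨k / m, ?_, ?_⟩
      · have hle : k / m + 1 ≤ (n - j + m - 1) / m := by
          apply (Nat.le_div_iff_mul_le hm).mpr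
          have hd : m * (k / m) + k % m = k := Nat.div_add_mod k m
          have heq : (k/m+1)*m = m*(k/m)+m := by ring
          omega
        omega
      · have hd : m * (k / m) + k % m = k := Nat.div_add_mod k m
        omega
  have hperm := (List.perm_ext_iff_of_nodup nd1 nd2).mpr hmem
  have hs1 : (List.map (fun k => j + m * k) (List.range ((n - j + m - 1) / m))).Pairwise (· < ·) :=
    List.Pairwise.map _ (fun a b (h : a < b) => (by nlinarith : j + m * a < j + m * b)) List.pairwise_lt_range
  have hs2 : ((List.range n).filter (fun k => k % m = j)).Pairwise (· < ·) :=
    List.Pairwise.filter _ List.pairwise_lt_range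
  exact List.Perm.eq_of_pairwise (fun a b _ _ h1 h2 => Nat.le_antisymm h1 h2) (hs1.imp Nat.le_of_lt) (hs2.imp Nat.le_of_lt) hperm


lemma pv_slice_stride {α : Type} (xs : List α) (m j : Nat) (hm : 0 < m) (hj : j < m) (hjn : j < xs.length) :
    (PySem.List.slice? xs (some (j : Int)) none (m : Int)).getD [] = pvG xs m j := by
  have hm0 : ((m : Int)) ≠ 0 := by omega
  rw [PySem.List.slice?]
  simp only [if_neg hm0, PySem.List.sliceIndices]
  have hstep : ¬ ((m : Int) < 0) := by omega
  have hjneg : ¬ ((j : Int) < 0) := by omega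
  simp only [if_neg hstep, if_neg hjneg]
  have hmin : min (j : Int) (xs.length : Int) = (j : Int) := by omega
  rw [hmin]
  have hpos : (0 : Int) < (m : Int) := by omega
  rw [if_pos hpos, if_pos (by exact_mod_cast hjn : (j : Int) < (xs.length : Int))]
  have hcount : (((xs.length : Int) - (j : Int) + (m : Int) - 1) / (m : Int)).toNat
      = (xs.length - j + m - 1) / m := by
    have h1 : ((xs.length : Int) - (j : Int) + (m : Int) - 1) = ((xs.length - j + m - 1 : Nat) : Int) := by
      omega
    rw [h1, ← Int.natCast_div]
    exact Int.toNat_natCast _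
  rw [hcount]
  simp only [Option.getD_some]
  have hstep1 : ∀ k : Nat, ((j : Int) + (m : Int) * (k : Int)).toNat = j + m * k := by
    intro k; omega
  have h2 : List.filterMap (fun k : Nat => xs[((j : Int) + (m : Int) * (k : Int)).toNat]?) (List.range ((xs.length - j + m - 1) / m))
      = List.filterMap (fun i : Nat => xs[i]?) ((List.range ((xs.length - j + m - 1) / m)).map (fun k => j + m * k)) := by
    rw [List.filterMap_map]
    apply List.filterMap_congr
    intro k _
    simp [hstep1 k]
  rw [h2, pv_idx_eq _ _ _ hm hj hjn]
  rw [pvG, List.filterMap_filter]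
  apply List.filterMap_congr
  intro k _
  by_cases h : k % m = j <;> simp [h]

lemma pv_rr_eq (xs : List String) (bs : Int) (hbs : 0 < bs) :
    (((PySem.List.enumerate xs 0).foldl
      (fun b p =>
        let batch_idx := PySem.Int.mod p.1 (PySem.Int.floordiv ((xs.length : Int) + bs - 1) bs)
        PySem.List.pySetD b batch_idx (PySem.List.pyGetD b batch_idx [] ++ [p.2]))
      ((PySem.List.pyRange 0 (PySem.Int.floordiv ((xs.length : Int) + bs - 1) bs) 1).map (fun _ => ([] : List String)))).filter
      (fun batch => !batch.isEmpty))
    = (PySem.List.pyRange 0 (PySem.Int.floordiv ((xs.length : Int) + bs - 1) bs) 1).map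
        (fun j => (PySem.List.slice? xs (some j) none (PySem.Int.floordiv ((xs.length : Int) + bs - 1) bs)).getD []) := by
  set n := xs.length with hn
  obtain ⟨b, rfl⟩ : ∃ b : Nat, bs = (b : Int) := ⟨bs.toNat, by omega⟩
  have hb : 0 < b := by exact_mod_cast hbs
  have hmI : PySem.Int.floordiv ((n : Int) + (b : Int) - 1) (b : Int) = (((n + b - 1) / b : Nat) : Int) := by
    have h1 : (n : Int) + (b : Int) - 1 = ((n + b - 1 : Nat) : Int) := by omega
    rw [h1]
    exact PySem.Int.floordiv_natCast _ _
  set m := (n + b - 1) / b with hmdef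
  rw [hmI]
  rcases Nat.eq_zero_or_pos n with hn0 | hnpos
  · have hxs : xs = [] := List.length_eq_zero_iff.mp (hn ▸ hn0)
    have hm0 : m = 0 := by
      rw [hmdef, hn0]
      exact Nat.div_eq_of_lt (by omega)
    subst hxs
    rw [hm0]
    simp [PySem.List.enumerate]
  · have hm1 : 0 < m := by
      rw [hmdef]
      exact (Nat.le_div_iff_mul_le hb).mpr (by omega)
    have hmn : m ≤ n := by
      rw [hmdef]
      have := Nat.le_mul_of_pos_left n hb
      exact (Nat.div_le_iff_le_mul_add_pred hb).mpr (by omega)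
    rw [PySem.List.pyRange_zero_nat]
    have hinit_len : (((List.range m).map (fun k : Nat => (k : Int))).map (fun _ => ([] : List String))).length = m := by
      simp
    have h0 : (0 : Int) = ((0 : Nat) : Int) := rfl
    rw [h0, pv_foldA m hm1 xs 0 _ hinit_len]
    have hgetD : ∀ j : Nat, (((List.range m).map (fun k : Nat => (k : Int))).map (fun _ => ([] : List String))).getD j [] = [] := by
      intro j
      rcases Nat.lt_or_ge j m with h | h
      · rw [List.getD_eq_getElem?_getD, List.getElem?_eq_getElem (by simpa using h)]
        simp
      · rw [List.getD_eq_getElem?_getD, List.getElem?_eq_none (by simpa using h)]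
        rfl
    have hcols : ∀ j ∈ List.range m, (((List.range m).map (fun k : Nat => (k : Int))).map (fun _ => ([] : List String))).getD j [] ++ pvF xs 0 m j = pvG xs m j := by
      intro j hj
      rw [hgetD j, List.nil_append, pv_pvF_eq]
      rw [pvG]
      apply List.filterMap_congr
      intro k _
      rw [Nat.zero_add]
    rw [List.map_congr_left hcols]
    have hfilter : (List.map (fun j => pvG xs m j) (List.range m)).filter (fun batch => !batch.isEmpty) = List.map (fun j => pvG xs m j) (List.range m) := by
      apply List.filter_eq_self.mpr
      intro a ha
      obtain ⟨j, hj, rfl⟩ := List.mem_map.mp ha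
      rw [List.mem_range] at hj
      have := pv_G_ne_nil xs m j hj (by omega)
      simpa [List.isEmpty_iff]
    rw [hfilter, List.map_map]
    apply List.map_congr_left
    intro j hj
    rw [List.mem_range] at hj
    simp only [Function.comp]
    exact (pv_slice_stride xs m j hm1 hj (by omega)).symm
-- ===== VERDICT (by name: the statement is the Claim_ definition above) =====
theorem create_test_batches_spec : Claim_equal_create_test_batches := by
  intro test_ids batch_size strategy _ hpre
  obtain ⟨hbs, hstrat⟩ := hpre
  unfold Spec_create_test_batches create_test_batches create_test_batches_alt
  have hb : ¬ batch_size ≤ 0 := by omega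
  rcases hstrat with h | h | h
  · simp only [if_neg hb, if_pos h]
    exact PySem.List.foldl_append_singleton_eq_map _ _ []
  · have hns : strategy ≠ "sequential" := by rw [h]; decide
    simp only [if_neg hb, if_neg hns, if_pos h, if_pos (Or.inl h : strategy = "round_robin" ∨ strategy = "balanced")]
    exact pv_rr_eq test_ids batch_size hbs
  · have hns : strategy ≠ "sequential" := by rw [h]; decide
    have hnr : strategy ≠ "round_robin" := by rw [h]; decide
    simp only [if_neg hb, if_neg hns, if_neg hnr, if_pos h, if_pos (Or.inr h : strategy = "round_robin" ∨ strategy = "balanced")]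
    exact pv_rr_eq test_ids batch_size hbs
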